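-- pv_equiv track=rewrite | github.com/Gerrit8008/Scanner_CGT | split_enhanced_scan.py | categorize_scan_components
-- ===== SOURCE A (Python) =====
-- def categorize_scan_components(classes, functions):
--     """Categorize classes and functions into modules."""
--     categories = {
--         'progress_tracking': [],  # Progress tracking and real-time updates
--         'network_scan': [],  # Network scanning components
--         'web_scan': [],  # Web application scanning
--         'dns_scan': [],  # DNS and domain scanning
--         'ssl_scan': [],  # SSL/TLS certificate scanning
--         'vulnerability_scan': [],  # Vulnerability detection
--         'results': [],  # Result processing and formatting
--         'utils': [],  # Utility functions
--     }
--
--     # Categorize classes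
--     for class_name, class_block in classes:
--         if 'Progress' in class_name or 'Tracker' in class_name:
--             categories['progress_tracking'].append(('class', class_name, class_block))
--         elif 'Network' in class_name or 'Port' in class_name:
--             categories['network_scan'].append(('class', class_name, class_block))
--         elif 'Web' in class_name or 'Http' in class_name:
--             categories['web_scan'].append(('class', class_name, class_block))
--         elif 'DNS' in class_name or 'Domain' in class_name:
--             categories['dns_scan'].append(('class', class_name, class_block))
--         elif 'SSL' in class_name or 'Certificate' in class_name:
--             categories['ssl_scan'].append(('class', class_name, class_block))
--         elif 'Vulnerability' in class_name or 'CVE' in class_name: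
--             categories['vulnerability_scan'].append(('class', class_name, class_block))
--         elif 'Result' in class_name or 'Report' in class_name:
--             categories['results'].append(('class', class_name, class_block))
--         else:
--             categories['utils'].append(('class', class_name, class_block))
--
--     # Categorize functions
--     for func_name, func_block in functions:
--         if 'progress' in func_name or 'track' in func_name or 'callback' in func_name:
--             categories['progress_tracking'].append(('function', func_name, func_block))
--         elif 'network' in func_name or 'port' in func_name or 'gateway' in func_name:
--             categories['network_scan'].append(('function', func_name, func_block))
--         elif 'web' in func_name or 'http' in func_name or 'crawl' in func_name:
--             categories['web_scan'].append(('function', func_name, func_block))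
--         elif 'dns' in func_name or 'domain' in func_name:
--             categories['dns_scan'].append(('function', func_name, func_block))
--         elif 'ssl' in func_name or 'tls' in func_name or 'certificate' in func_name:
--             categories['ssl_scan'].append(('function', func_name, func_block))
--         elif 'vulnerability' in func_name or 'cve' in func_name or 'exploit' in func_name:
--             categories['vulnerability_scan'].append(('function', func_name, func_block))
--         elif 'result' in func_name or 'report' in func_name or 'format' in func_name:
--             categories['results'].append(('function', func_name, func_block))
--         else:
--             categories['utils'].append(('function', func_name, func_block))
--
--     return categories
-- ===== SOURCE B (Python) =====
-- _CLASS_RULES = [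
--     ('progress_tracking', ('Progress', 'Tracker')),
--     ('network_scan', ('Network', 'Port')),
--     ('web_scan', ('Web', 'Http')),
--     ('dns_scan', ('DNS', 'Domain')),
--     ('ssl_scan', ('SSL', 'Certificate')),
--     ('vulnerability_scan', ('Vulnerability', 'CVE')),
--     ('results', ('Result', 'Report')),
-- ]
-- _FUNC_RULES = [
--     ('progress_tracking', ('progress', 'track', 'callback')),
--     ('network_scan', ('network', 'port', 'gateway')),
--     ('web_scan', ('web', 'http', 'crawl')),
--     ('dns_scan', ('dns', 'domain')),
--     ('ssl_scan', ('ssl', 'tls', 'certificate')),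
--     ('vulnerability_scan', ('vulnerability', 'cve', 'exploit')),
--     ('results', ('result', 'report', 'format')),
-- ]
-- _ORDER = ['progress_tracking', 'network_scan', 'web_scan', 'dns_scan',
--           'ssl_scan', 'vulnerability_scan', 'results', 'utils']
--
-- def _category(name, rules):
--     """First category whose any substring occurs in name, else 'utils'."""
--     for cat, subs in rules:
--         if any(s in name for s in subs):
--             return cat
--     return 'utils'
--
-- def categorize_scan_components(classes, functions):
--     """Categorize classes and functions into modules."""
--     tagged = [(_category(n, _CLASS_RULES), ('class', n, b)) for n, b in classes] \
--            + [(_category(n, _FUNC_RULES), ('function', n, b)) for n, b in functions]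
--     return {cat: [item for c, item in tagged if c == cat] for cat in _ORDER}
-- ===== Notes on version B (the rewrite author's own statement) =====
-- stated objective: simpler
-- what changed: Replaces the two eight-way elif append loops by ordered (category, substrings) rule tables with a first-match classifier, tagging each item once and building the result dict by a per-category group-by comprehension.
import Mathlib
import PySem

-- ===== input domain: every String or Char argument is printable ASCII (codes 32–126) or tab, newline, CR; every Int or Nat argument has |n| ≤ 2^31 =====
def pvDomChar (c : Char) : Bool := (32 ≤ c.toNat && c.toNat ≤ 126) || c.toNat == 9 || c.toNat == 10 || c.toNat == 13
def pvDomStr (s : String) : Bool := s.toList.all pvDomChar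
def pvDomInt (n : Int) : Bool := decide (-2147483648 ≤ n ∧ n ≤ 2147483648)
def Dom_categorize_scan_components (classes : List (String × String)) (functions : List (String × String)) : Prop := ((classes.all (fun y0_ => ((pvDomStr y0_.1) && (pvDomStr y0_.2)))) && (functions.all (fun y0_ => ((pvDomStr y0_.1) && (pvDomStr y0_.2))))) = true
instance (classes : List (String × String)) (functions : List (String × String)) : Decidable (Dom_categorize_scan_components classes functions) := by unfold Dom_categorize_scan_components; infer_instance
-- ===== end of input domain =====

-- B replaces A's elif-chain append loops by ordered rule tables with a first-match
-- classifier and a per-category group-by; objective: simpler.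

-- ===== PORT A =====
def categorize_scan_components (classes : List (String × String)) (functions : List (String × String)) : List (String × List (String × String × String)) :=
  let categories : PySem.Dict String (List (String × String × String)) :=
    PySem.Dict.ofList [("progress_tracking", []), ("network_scan", []), ("web_scan", []),
      ("dns_scan", []), ("ssl_scan", []), ("vulnerability_scan", []), ("results", []), ("utils", [])]
  let categories := classes.foldl (fun d p =>
    if PySem.Str.isIn "Progress" p.1 || PySem.Str.isIn "Tracker" p.1 then
      d.modify "progress_tracking" [] (· ++ [("class", p.1, p.2)])
    else if PySem.Str.isIn "Network" p.1 || PySem.Str.isIn "Port" p.1 then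
      d.modify "network_scan" [] (· ++ [("class", p.1, p.2)])
    else if PySem.Str.isIn "Web" p.1 || PySem.Str.isIn "Http" p.1 then
      d.modify "web_scan" [] (· ++ [("class", p.1, p.2)])
    else if PySem.Str.isIn "DNS" p.1 || PySem.Str.isIn "Domain" p.1 then
      d.modify "dns_scan" [] (· ++ [("class", p.1, p.2)])
    else if PySem.Str.isIn "SSL" p.1 || PySem.Str.isIn "Certificate" p.1 then
      d.modify "ssl_scan" [] (· ++ [("class", p.1, p.2)])
    else if PySem.Str.isIn "Vulnerability" p.1 || PySem.Str.isIn "CVE" p.1 then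
      d.modify "vulnerability_scan" [] (· ++ [("class", p.1, p.2)])
    else if PySem.Str.isIn "Result" p.1 || PySem.Str.isIn "Report" p.1 then
      d.modify "results" [] (· ++ [("class", p.1, p.2)])
    else
      d.modify "utils" [] (· ++ [("class", p.1, p.2)])) categories
  let categories := functions.foldl (fun d p =>
    if PySem.Str.isIn "progress" p.1 || PySem.Str.isIn "track" p.1 || PySem.Str.isIn "callback" p.1 then
      d.modify "progress_tracking" [] (· ++ [("function", p.1, p.2)])
    else if PySem.Str.isIn "network" p.1 || PySem.Str.isIn "port" p.1 || PySem.Str.isIn "gateway" p.1 then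
      d.modify "network_scan" [] (· ++ [("function", p.1, p.2)])
    else if PySem.Str.isIn "web" p.1 || PySem.Str.isIn "http" p.1 || PySem.Str.isIn "crawl" p.1 then
      d.modify "web_scan" [] (· ++ [("function", p.1, p.2)])
    else if PySem.Str.isIn "dns" p.1 || PySem.Str.isIn "domain" p.1 then
      d.modify "dns_scan" [] (· ++ [("function", p.1, p.2)])
    else if PySem.Str.isIn "ssl" p.1 || PySem.Str.isIn "tls" p.1 || PySem.Str.isIn "certificate" p.1 then
      d.modify "ssl_scan" [] (· ++ [("function", p.1, p.2)])
    else if PySem.Str.isIn "vulnerability" p.1 || PySem.Str.isIn "cve" p.1 || PySem.Str.isIn "exploit" p.1 then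
      d.modify "vulnerability_scan" [] (· ++ [("function", p.1, p.2)])
    else if PySem.Str.isIn "result" p.1 || PySem.Str.isIn "report" p.1 || PySem.Str.isIn "format" p.1 then
      d.modify "results" [] (· ++ [("function", p.1, p.2)])
    else
      d.modify "utils" [] (· ++ [("function", p.1, p.2)])) categories
  categories.items

-- ===== PORT B =====
def pvClassRules : List (String × List String) :=
  [("progress_tracking", ["Progress", "Tracker"]), ("network_scan", ["Network", "Port"]),
   ("web_scan", ["Web", "Http"]), ("dns_scan", ["DNS", "Domain"]),
   ("ssl_scan", ["SSL", "Certificate"]), ("vulnerability_scan", ["Vulnerability", "CVE"]),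
   ("results", ["Result", "Report"])]

def pvFuncRules : List (String × List String) :=
  [("progress_tracking", ["progress", "track", "callback"]), ("network_scan", ["network", "port", "gateway"]),
   ("web_scan", ["web", "http", "crawl"]), ("dns_scan", ["dns", "domain"]),
   ("ssl_scan", ["ssl", "tls", "certificate"]), ("vulnerability_scan", ["vulnerability", "cve", "exploit"]),
   ("results", ["result", "report", "format"])]

def pvOrder : List String :=
  ["progress_tracking", "network_scan", "web_scan", "dns_scan",
   "ssl_scan", "vulnerability_scan", "results", "utils"]

-- first category whose any substring occurs in name, else "utils"
def pvCategory (name : String) : List (String × List String) → String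
  | [] => "utils"
  | (cat, subs) :: rest =>
      if subs.any (fun s => PySem.Str.isIn s name) then cat else pvCategory name rest

def categorize_scan_components_alt (classes : List (String × String)) (functions : List (String × String)) : List (String × List (String × String × String)) :=
  let tagged :=
    classes.map (fun p => (pvCategory p.1 pvClassRules, ("class", p.1, p.2)))
    ++ functions.map (fun p => (pvCategory p.1 pvFuncRules, ("function", p.1, p.2)))
  pvOrder.map (fun cat => (cat, (tagged.filter (fun q => q.1 == cat)).map (·.2)))

-- ===== PRECONDITION & SPEC =====
def Spec_categorize_scan_components (classes : List (String × String)) (functions : List (String × String)) (out : List (String × List (String × String × String))) : Prop := out = categorize_scan_components_alt classes functions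
instance (classes : List (String × String)) (functions : List (String × String)) (out : List (String × List (String × String × String))) : Decidable (Spec_categorize_scan_components classes functions out) := by unfold Spec_categorize_scan_components; infer_instance

-- ===== CLAIM (what is proved, stated in full; the proofs are below) =====
def Claim_equal_categorize_scan_components : Prop := ∀ (classes : List (String × String)) (functions : List (String × String)), Dom_categorize_scan_components classes functions → Spec_categorize_scan_components classes functions (categorize_scan_components classes functions)

-- ===== LEMMAS AND PROOFS =====

-- A's elif chain over a class name is exactly B's first-match classification by pvClassRules
theorem classStep_eq (d : PySem.Dict String (List (String × String × String))) (p : String × String) :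
    (if PySem.Str.isIn "Progress" p.1 || PySem.Str.isIn "Tracker" p.1 then
      d.modify "progress_tracking" [] (· ++ [("class", p.1, p.2)])
    else if PySem.Str.isIn "Network" p.1 || PySem.Str.isIn "Port" p.1 then
      d.modify "network_scan" [] (· ++ [("class", p.1, p.2)])
    else if PySem.Str.isIn "Web" p.1 || PySem.Str.isIn "Http" p.1 then
      d.modify "web_scan" [] (· ++ [("class", p.1, p.2)])
    else if PySem.Str.isIn "DNS" p.1 || PySem.Str.isIn "Domain" p.1 then
      d.modify "dns_scan" [] (· ++ [("class", p.1, p.2)])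
    else if PySem.Str.isIn "SSL" p.1 || PySem.Str.isIn "Certificate" p.1 then
      d.modify "ssl_scan" [] (· ++ [("class", p.1, p.2)])
    else if PySem.Str.isIn "Vulnerability" p.1 || PySem.Str.isIn "CVE" p.1 then
      d.modify "vulnerability_scan" [] (· ++ [("class", p.1, p.2)])
    else if PySem.Str.isIn "Result" p.1 || PySem.Str.isIn "Report" p.1 then
      d.modify "results" [] (· ++ [("class", p.1, p.2)])
    else
      d.modify "utils" [] (· ++ [("class", p.1, p.2)]))
    = d.modify (pvCategory p.1 pvClassRules) [] (· ++ [("class", p.1, p.2)]) := by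
  simp only [pvCategory, pvClassRules, List.any_cons, List.any_nil, Bool.or_false]
  split_ifs <;> rfl

theorem funcStep_eq (d : PySem.Dict String (List (String × String × String))) (p : String × String) :
    (if PySem.Str.isIn "progress" p.1 || PySem.Str.isIn "track" p.1 || PySem.Str.isIn "callback" p.1 then
      d.modify "progress_tracking" [] (· ++ [("function", p.1, p.2)])
    else if PySem.Str.isIn "network" p.1 || PySem.Str.isIn "port" p.1 || PySem.Str.isIn "gateway" p.1 then
      d.modify "network_scan" [] (· ++ [("function", p.1, p.2)])
    else if PySem.Str.isIn "web" p.1 || PySem.Str.isIn "http" p.1 || PySem.Str.isIn "crawl" p.1 then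
      d.modify "web_scan" [] (· ++ [("function", p.1, p.2)])
    else if PySem.Str.isIn "dns" p.1 || PySem.Str.isIn "domain" p.1 then
      d.modify "dns_scan" [] (· ++ [("function", p.1, p.2)])
    else if PySem.Str.isIn "ssl" p.1 || PySem.Str.isIn "tls" p.1 || PySem.Str.isIn "certificate" p.1 then
      d.modify "ssl_scan" [] (· ++ [("function", p.1, p.2)])
    else if PySem.Str.isIn "vulnerability" p.1 || PySem.Str.isIn "cve" p.1 || PySem.Str.isIn "exploit" p.1 then
      d.modify "vulnerability_scan" [] (· ++ [("function", p.1, p.2)])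
    else if PySem.Str.isIn "result" p.1 || PySem.Str.isIn "report" p.1 || PySem.Str.isIn "format" p.1 then
      d.modify "results" [] (· ++ [("function", p.1, p.2)])
    else
      d.modify "utils" [] (· ++ [("function", p.1, p.2)]))
    = d.modify (pvCategory p.1 pvFuncRules) [] (· ++ [("function", p.1, p.2)]) := by
  simp only [pvCategory, pvFuncRules, List.any_cons, List.any_nil, Bool.or_false, Bool.or_assoc]
  split_ifs <;> rfl

theorem pvCategory_mem_order (name : String) : pvCategory name pvClassRules ∈ pvOrder ∧ pvCategory name pvFuncRules ∈ pvOrder := by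
  constructor <;>
  · simp only [pvCategory, pvClassRules, pvFuncRules, pvOrder]
    split_ifs <;> simp

-- keys are unchanged by a grouping fold whose keys already exist in the dict
theorem pvFoldKeys (key : (String × String) → String) (val : (String × String) → String × String × String)
    (l : List (String × String)) (d : PySem.Dict String (List (String × String × String)))
    (h : ∀ p ∈ l, key p ∈ d.keys) :
    (l.foldl (fun d p => d.modify (key p) [] (fun x => x ++ [val p])) d).keys = d.keys := by
  induction l generalizing d with
  | nil => rfl
  | cons p l ih =>
    have hc : d.contains (key p) = true :=
      (PySem.Dict.contains_iff_mem_keys _ _).mpr (h p (by simp))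
    have hk : (d.modify (key p) [] (fun x => x ++ [val p])).keys = d.keys := by
      simp [PySem.Dict.keys_modify, PySem.Dict.keys_insert_of_contains, hc]
    rw [List.foldl_cons, ih, hk]
    intro q hq
    rw [hk]
    exact h q (by simp [hq])

-- each bucket of the fold is the old bucket plus the matching items, in order
theorem pvFoldGetD (key : (String × String) → String) (val : (String × String) → String × String × String)
    (l : List (String × String)) (d : PySem.Dict String (List (String × String × String))) (c : String) :
    (l.foldl (fun d p => d.modify (key p) [] (fun x => x ++ [val p])) d).getD c []
      = d.getD c [] ++ (l.filter (fun p => key p == c)).map val := by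
  induction l generalizing d with
  | nil => simp
  | cons p l ih =>
    rw [List.foldl_cons, ih]
    by_cases h : key p = c
    · subst h
      simp [PySem.Dict.getD_modify_self]
    · rw [PySem.Dict.getD_modify]
      have h' : ¬ c = key p := fun hc => h hc.symm
      simp [h, h']

theorem pvInitKeys :
    (PySem.Dict.ofList (κ := String) (ν := List (String × String × String))
      [("progress_tracking", []), ("network_scan", []), ("web_scan", []),
       ("dns_scan", []), ("ssl_scan", []), ("vulnerability_scan", []), ("results", []), ("utils", [])]).keys
    = pvOrder := by decide

theorem pvInitGetD (c : String) (hc : c ∈ pvOrder) :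
    (PySem.Dict.ofList (κ := String) (ν := List (String × String × String))
      [("progress_tracking", []), ("network_scan", []), ("web_scan", []),
       ("dns_scan", []), ("ssl_scan", []), ("vulnerability_scan", []), ("results", []), ("utils", [])]).getD c []
    = [] := by
  fin_cases hc <;> decide

-- ===== VERDICT (by name: the statement is the Claim_ definition above) =====
theorem categorize_scan_components_spec : Claim_equal_categorize_scan_components := by
  intro classes functions _
  unfold Spec_categorize_scan_components categorize_scan_components categorize_scan_components_alt
  simp only [classStep_eq, funcStep_eq]
  rw [show (fun (d : PySem.Dict String (List (String × String × String))) (p : String × String) =>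
        d.modify (pvCategory p.1 pvClassRules) [] (fun x => x ++ [("class", p.1, p.2)]))
      = (fun d p => d.modify ((fun p : String × String => pvCategory p.1 pvClassRules) p) []
          (fun x => x ++ [(fun p : String × String => (("class", p.1, p.2) : String × String × String)) p])) from rfl]
  rw [show (fun (d : PySem.Dict String (List (String × String × String))) (p : String × String) =>
        d.modify (pvCategory p.1 pvFuncRules) [] (fun x => x ++ [("function", p.1, p.2)]))
      = (fun d p => d.modify ((fun p : String × String => pvCategory p.1 pvFuncRules) p) []
          (fun x => x ++ [(fun p : String × String => (("function", p.1, p.2) : String × String × String)) p])) from rfl]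
  have hkeys1 := pvFoldKeys (fun p => pvCategory p.1 pvClassRules)
      (fun p => (("class", p.1, p.2) : String × String × String)) classes _
      (by intro p _; rw [pvInitKeys]; exact (pvCategory_mem_order p.1).1)
  have hkeys2 := pvFoldKeys (fun p => pvCategory p.1 pvFuncRules)
      (fun p => (("function", p.1, p.2) : String × String × String)) functions _
      (by intro p _; rw [hkeys1, pvInitKeys]; exact (pvCategory_mem_order p.1).2)
  rw [PySem.Dict.items_eq_map_keys _ (by rw [hkeys2, hkeys1, pvInitKeys]; decide) []]
  rw [hkeys2, hkeys1, pvInitKeys]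
  apply List.map_congr_left
  intro c hc
  rw [pvFoldGetD, pvFoldGetD, pvInitGetD c hc]
  simp [List.filter_map, List.map_map, Function.comp_def]
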